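-- pv_equiv track=rewrite | github.com/friendoye/matasano-challenge | set1/detect_aes_128_ecb.py | detect_aes_128_ecb
-- ===== SOURCE A (Python) =====
-- def detect_aes_128_ecb(string):
--     block_size = 16
--     blocks = []
--     for i in range(0, len(string), block_size):
--         blocks.append(string[i: i + block_size])
--     pair_list = [(i, j) for i in range(0, len(blocks))
--                         for j in range(0, len(blocks)) if i < j]
--     for (i, j) in pair_list:
--         if blocks[i] == blocks[j]:
--             return True
--     return False
-- ===== SOURCE B (Python) =====
-- def detect_aes_128_ecb(string):
--     block_size = 16
--     blocks = sorted(string[i: i + block_size]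
--                     for i in range(0, len(string), block_size))
--     for k in range(len(blocks) - 1):
--         if blocks[k] == blocks[k + 1]:
--             return True
--     return False
-- ===== Notes on version B (the rewrite author's own statement) =====
-- stated objective: faster
-- what changed: Replaces the explicit all-pairs (i,j) comparison list with sorting the blocks and a single linear scan for two equal adjacent blocks.
import Mathlib
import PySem

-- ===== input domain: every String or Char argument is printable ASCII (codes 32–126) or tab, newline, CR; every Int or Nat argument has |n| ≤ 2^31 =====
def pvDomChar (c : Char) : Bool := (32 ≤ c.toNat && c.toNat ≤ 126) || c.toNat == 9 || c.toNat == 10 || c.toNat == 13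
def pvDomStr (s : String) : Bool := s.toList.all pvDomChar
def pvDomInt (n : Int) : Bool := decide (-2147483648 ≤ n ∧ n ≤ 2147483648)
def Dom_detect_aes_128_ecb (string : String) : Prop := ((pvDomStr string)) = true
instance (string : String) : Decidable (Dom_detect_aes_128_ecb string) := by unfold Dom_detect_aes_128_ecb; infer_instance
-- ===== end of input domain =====

-- B replaces A's all-pairs comparison with sort-then-adjacent-scan.

-- ===== PORT A =====
def detect_aes_128_ecb (string : String) : Bool :=
  let block_size : Int := 16
  let blocks : List String :=
    (PySem.List.pyRange 0 (PySem.Str.len string) block_size).foldl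
      (fun acc i => acc ++ [PySem.Str.slice string (some i) (some (i + block_size))]) []
  let pair_list : List (Int × Int) :=
    (PySem.List.pyRange 0 (PySem.List.len blocks) 1).flatMap (fun i =>
      ((PySem.List.pyRange 0 (PySem.List.len blocks) 1).filter (fun j => decide (i < j))).map
        (fun j => (i, j)))
  pair_list.any (fun p =>
    PySem.List.pyGetD blocks p.1 "" == PySem.List.pyGetD blocks p.2 "")

-- ===== PORT B =====
-- the 'for k in range(len(blocks)-1)' adjacent scan, as structural recursion on the sorted list
def pvAdjDup : List String → Bool
  | a :: b :: t => a == b || pvAdjDup (b :: t)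
  | _ => false

def detect_aes_128_ecb_alt (string : String) : Bool :=
  let block_size : Int := 16
  let blocks : List String :=
    PySem.List.sorted
      ((PySem.List.pyRange 0 (PySem.Str.len string) block_size).map
        (fun i => PySem.Str.slice string (some i) (some (i + block_size))))
      (fun b => b) false
  pvAdjDup blocks

-- ===== PRECONDITION & SPEC =====
def Spec_detect_aes_128_ecb (string : String) (out : Bool) : Prop := out = detect_aes_128_ecb_alt string
instance (string : String) (out : Bool) : Decidable (Spec_detect_aes_128_ecb string out) := by unfold Spec_detect_aes_128_ecb; infer_instance

-- ===== CLAIM (what is proved, stated in full; the proofs are below) =====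
def Claim_equal_detect_aes_128_ecb : Prop := ∀ (string : String), Dom_detect_aes_128_ecb string → Spec_detect_aes_128_ecb string (detect_aes_128_ecb string)

-- ===== LEMMAS AND PROOFS =====

-- A's all-pairs scan is exactly "some duplicate exists", i.e. ¬ Nodup
lemma pvA_eq_not_nodup (bs : List String) :
    (((PySem.List.pyRange 0 (PySem.List.len bs) 1).flatMap (fun i =>
        ((PySem.List.pyRange 0 (PySem.List.len bs) 1).filter (fun j => decide (i < j))).map
          (fun j => (i, j)))).any (fun p =>
        PySem.List.pyGetD bs p.1 "" == PySem.List.pyGetD bs p.2 "")) = !decide bs.Nodup := by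
  rw [Bool.eq_iff_iff]
  simp only [List.any_eq_true, List.mem_flatMap, List.mem_map, List.mem_filter,
    PySem.List.mem_pyRange_one, PySem.List.len_eq, Bool.not_eq_eq_eq_not, Bool.not_true,
    decide_eq_true_eq, decide_eq_false_iff_not]
  constructor
  · rintro ⟨p, ⟨i, ⟨hi0, hin⟩, j, ⟨⟨hj0, hjn⟩, hij⟩, rfl⟩, heq⟩
    rw [beq_iff_eq] at heq
    rw [List.nodup_iff_getElem?_ne_getElem?]
    push Not
    refine ⟨i.toNat, j.toNat, by omega, by omega, ?_⟩
    rw [PySem.List.pyGetD_eq_getElem bs "" hi0 hin,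
        PySem.List.pyGetD_eq_getElem bs "" hj0 hjn] at heq
    rw [List.getElem?_eq_getElem (by omega), List.getElem?_eq_getElem (by omega)]
    simpa using heq
  · intro hnd
    rw [List.nodup_iff_getElem?_ne_getElem?] at hnd
    push Not at hnd
    obtain ⟨i, j, hij, hjn, heq⟩ := hnd
    refine ⟨((i : Int), (j : Int)), ⟨(i : Int), ⟨by omega, by omega⟩,
      (j : Int), ⟨⟨by omega, by omega⟩, by exact_mod_cast hij⟩, rfl⟩, ?_⟩
    rw [List.getElem?_eq_getElem (by omega), List.getElem?_eq_getElem hjn] at heq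
    rw [beq_iff_eq,
      PySem.List.pyGetD_eq_getElem bs "" (by omega) (by show (i:Int) < (bs.length:Int); exact_mod_cast (by omega : i < bs.length)),
      PySem.List.pyGetD_eq_getElem bs "" (by omega) (by show (j:Int) < (bs.length:Int); exact_mod_cast hjn)]
    simpa using heq

-- on a ≤-sorted list, an adjacent duplicate is exactly a duplicate
lemma pvAdjDup_eq_not_nodup (l : List String) (h : l.Pairwise (· ≤ ·)) :
    pvAdjDup l = !decide l.Nodup := by
  induction l with
  | nil => simp [pvAdjDup]
  | cons a t ih =>
    cases t with
    | nil => simp [pvAdjDup]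
    | cons b t' =>
      rw [List.pairwise_cons] at h
      obtain ⟨hab, ht⟩ := h
      have key : a ∈ b :: t' → a = b := by
        intro hmem
        rcases List.mem_cons.mp hmem with rfl | hat
        · rfl
        · exact le_antisymm (hab b List.mem_cons_self) ((List.pairwise_cons.mp ht).1 a hat)
      rw [pvAdjDup, ih ht, Bool.eq_iff_iff]
      simp only [Bool.or_eq_true, beq_iff_eq, Bool.not_eq_eq_eq_not, Bool.not_true,
        decide_eq_false_iff_not, List.nodup_cons, not_and]
      constructor
      · rintro (rfl | hdup)
        · intro hn; exact absurd List.mem_cons_self hn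
        · intro _; exact hdup
      · intro hx
        by_cases hmem : a ∈ b :: t'
        · exact Or.inl (key hmem)
        · exact Or.inr (hx hmem)

-- ===== VERDICT (by name: the statement is the Claim_ definition above) =====
theorem detect_aes_128_ecb_spec : Claim_equal_detect_aes_128_ecb := by
  intro s _
  unfold Spec_detect_aes_128_ecb detect_aes_128_ecb detect_aes_128_ecb_alt
  simp only [PySem.List.foldl_append_singleton_eq_map, List.nil_append]
  set bs := (PySem.List.pyRange 0 (PySem.Str.len s) 16).map
      (fun i => PySem.Str.slice s (some i) (some (i + 16))) with hbs
  rw [pvA_eq_not_nodup bs,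
    pvAdjDup_eq_not_nodup _ (by simpa using PySem.List.sorted_pairwise bs (fun b => b))]
  exact congrArg (fun x => !x)
    (decide_eq_decide.mpr ((PySem.List.sorted_perm bs (fun b => b) false).nodup_iff).symm)
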